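-- pv_equiv track=rewrite | github.com/SaiKiran-Adepu/FLIGHT-TICKET-BOOKING-SYSTEM | admin/ticket_admindb.py | generate_seat_numbers
-- ===== SOURCE A (Python) =====
-- def generate_seat_numbers(num_passengers, class_type):
--     seat_prefix = {
--         'FIRST CLASS': '1A 1B 1C 1D 2A 2B 2C 2D 3A 3B 3C 3D'.split(),
--         'BUSINESS CLASS': '4A 4B 4C 4D 5A 5B 5C 5D 6A 6B 6C 6D'.split(),
--         'PREMIUM ECONOMY': '7A 7B 7C 7D 8A 8B 8C 8D 9A 9B 9C 9D'.split(),
--         'ECONOMY': '10A 10B 10C 10D 11A 11B 11C 11D 12A 12B 12C 12D'.split()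
--     }
--     seats = seat_prefix.get(class_type, [])
--     if not seats:
--         raise ValueError(f"No seats available for flight class: {class_type}")
--     return [seats[i % len(seats)] for i in range(num_passengers)]
-- ===== SOURCE B (Python) =====
-- def generate_seat_numbers(num_passengers, class_type):
--     seat_prefix = {
--         'FIRST CLASS': '1A 1B 1C 1D 2A 2B 2C 2D 3A 3B 3C 3D'.split(),
--         'BUSINESS CLASS': '4A 4B 4C 4D 5A 5B 5C 5D 6A 6B 6C 6D'.split(),
--         'PREMIUM ECONOMY': '7A 7B 7C 7D 8A 8B 8C 8D 9A 9B 9C 9D'.split(),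
--         'ECONOMY': '10A 10B 10C 10D 11A 11B 11C 11D 12A 12B 12C 12D'.split()
--     }
--     seats = seat_prefix.get(class_type, [])
--     if not seats:
--         raise ValueError(f"No seats available for flight class: {class_type}")
--     full = seats * (num_passengers // len(seats) + 1)
--     return full[:num_passengers]
-- ===== Notes on version B (the rewrite author's own statement) =====
-- stated objective: simpler
-- what changed: Replaces the per-index modulo comprehension with list repetition plus a truncating slice: the cyclic output is built as seats * (n // len(seats) + 1) then cut to n, removing the explicit index loop and the per-element % operation.
import Mathlib
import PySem

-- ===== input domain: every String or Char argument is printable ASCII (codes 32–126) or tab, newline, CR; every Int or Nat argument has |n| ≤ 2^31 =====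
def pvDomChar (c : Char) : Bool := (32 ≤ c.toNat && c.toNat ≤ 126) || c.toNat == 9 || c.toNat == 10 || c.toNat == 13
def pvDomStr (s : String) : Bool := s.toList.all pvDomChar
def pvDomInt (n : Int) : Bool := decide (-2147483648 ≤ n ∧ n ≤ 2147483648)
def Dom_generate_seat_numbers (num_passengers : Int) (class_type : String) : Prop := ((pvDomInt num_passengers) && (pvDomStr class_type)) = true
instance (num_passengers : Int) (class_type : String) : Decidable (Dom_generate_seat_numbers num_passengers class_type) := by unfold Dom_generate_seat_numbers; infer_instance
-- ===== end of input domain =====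

-- B replaces the per-index modulo comprehension with list repetition plus a truncating
-- slice (objective: simpler). Both raise ValueError on an unknown class; Pre_ excludes that.

-- ===== PORT A =====
-- the seat_prefix dict literal (identical in Source A and Source B)
def pvSeatPrefix : PySem.Dict String (List String) :=
  ((((PySem.Dict.empty).insert "FIRST CLASS" (PySem.Str.split₀ "1A 1B 1C 1D 2A 2B 2C 2D 3A 3B 3C 3D")).insert
      "BUSINESS CLASS" (PySem.Str.split₀ "4A 4B 4C 4D 5A 5B 5C 5D 6A 6B 6C 6D")).insert
      "PREMIUM ECONOMY" (PySem.Str.split₀ "7A 7B 7C 7D 8A 8B 8C 8D 9A 9B 9C 9D")).insert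
      "ECONOMY" (PySem.Str.split₀ "10A 10B 10C 10D 11A 11B 11C 11D 12A 12B 12C 12D")

def generate_seat_numbers (num_passengers : Int) (class_type : String) : List String :=
  let seats := pvSeatPrefix.getD class_type []
  -- 'if not seats: raise ValueError' — excluded by Pre_
  (PySem.List.pyRange 0 num_passengers 1).map
    (fun i => PySem.List.pyGetD seats (PySem.Int.mod i (seats.length : Int)) "")

-- ===== PORT B =====
def generate_seat_numbers_alt (num_passengers : Int) (class_type : String) : List String :=
  let seats := pvSeatPrefix.getD class_type []
  -- 'if not seats: raise ValueError' — excluded by Pre_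
  -- Python 'seats * k' yields [] for k ≤ 0, hence .toNat
  let full := List.flatten (List.replicate (PySem.Int.floordiv num_passengers (seats.length : Int) + 1).toNat seats)
  PySem.List.slice full none (some num_passengers)

-- ===== PRECONDITION & SPEC =====
-- Pre_ excludes exactly the class types absent from seat_prefix, on which both programs raise ValueError.
def Pre_generate_seat_numbers (num_passengers : Int) (class_type : String) : Prop :=
  class_type = "FIRST CLASS" ∨ class_type = "BUSINESS CLASS" ∨
  class_type = "PREMIUM ECONOMY" ∨ class_type = "ECONOMY"
instance (num_passengers : Int) (class_type : String) : Decidable (Pre_generate_seat_numbers num_passengers class_type) := by unfold Pre_generate_seat_numbers; infer_instance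
def pvWitness_generate_seat_numbers : Int × String := (5, "ECONOMY")

def Spec_generate_seat_numbers (num_passengers : Int) (class_type : String) (out : List String) : Prop := out = generate_seat_numbers_alt num_passengers class_type
instance (num_passengers : Int) (class_type : String) (out : List String) : Decidable (Spec_generate_seat_numbers num_passengers class_type out) := by unfold Spec_generate_seat_numbers; infer_instance

-- ===== CLAIM (what is proved, stated in full; the proofs are below) =====
def Claim_equal_generate_seat_numbers : Prop := ∀ (num_passengers : Int) (class_type : String), Dom_generate_seat_numbers num_passengers class_type → Pre_generate_seat_numbers num_passengers class_type → Spec_generate_seat_numbers num_passengers class_type (generate_seat_numbers num_passengers class_type)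

-- ===== LEMMAS AND PROOFS =====

-- element i of c copies of seats, flattened, is seats[i % L]
lemma getElem?_flatten_replicate {α : Type} (seats : List α) (c i : Nat)
    (h : i < c * seats.length) :
    (List.flatten (List.replicate c seats))[i]? = seats[i % seats.length]? := by
  induction c generalizing i with
  | zero => simp at h
  | succ c ih =>
    rw [List.replicate_succ, List.flatten_cons]
    by_cases hi : i < seats.length
    · rw [List.getElem?_append_left hi, Nat.mod_eq_of_lt hi]
    · have hi2 : seats.length ≤ i := by omega
      rw [List.getElem?_append_right hi2]
      have hsm : (c + 1) * seats.length = c * seats.length + seats.length := by ring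
      have : i - seats.length < c * seats.length := by omega
      rw [ih _ this]
      congr 1
      conv_rhs => rw [← Nat.sub_add_cancel hi2, Nat.add_mod_right]

-- main equivalence for a fixed nonempty seat list
lemma key (seats : List String) (hL : seats ≠ []) (n : Int) :
    (PySem.List.pyRange 0 n 1).map
      (fun i => PySem.List.pyGetD seats (PySem.Int.mod i (seats.length : Int)) "")
    = PySem.List.slice
        (List.flatten (List.replicate (PySem.Int.floordiv n (seats.length : Int) + 1).toNat seats))
        none (some n) := by
  have hL0 : 0 < seats.length := List.length_pos_iff.mpr hL
  by_cases hn : n ≤ 0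
  · -- n ≤ 0 : both sides are []
    rw [PySem.List.pyRange_one_eq_nil hn, List.map_nil]
    rcases eq_or_lt_of_le hn with h0 | hneg
    · subst h0
      have : PySem.Int.floordiv 0 (seats.length : Int) = 0 := by
        simp [PySem.Int.floordiv]
      rw [this]
      simp [PySem.List.slice]
    · have hfd : PySem.Int.floordiv n (seats.length : Int) < 0 := by
        by_contra hge
        rw [Int.not_lt] at hge
        have hmul := PySem.Int.floordiv_mul_add_mod n (seats.length : Int)
        have hm0 : 0 ≤ PySem.Int.mod n (seats.length : Int) :=
          PySem.Int.mod_nonneg _ (by exact_mod_cast hL0)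
        nlinarith
      have : (PySem.Int.floordiv n (seats.length : Int) + 1).toNat = 0 := by omega
      rw [this]
      simp [PySem.List.slice]
  · -- n > 0
    obtain ⟨m, rfl⟩ : ∃ m : Nat, n = (m : Int) := ⟨n.toNat, (Int.toNat_of_nonneg (by omega)).symm⟩
    rw [PySem.Int.floordiv_natCast, PySem.List.slice_to_natCast]
    have hcount : (((m / seats.length : Nat) : Int) + 1).toNat = m / seats.length + 1 := by
      rw [show ((m / seats.length : Nat) : Int) + 1 = ((m / seats.length + 1 : Nat) : Int) by push_cast; ring,
        Int.toNat_natCast]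
    rw [hcount, PySem.List.pyRange_one]
    simp only [sub_zero, Int.toNat_natCast, List.map_map]
    have hmapeq : ((fun i => PySem.List.pyGetD seats (PySem.Int.mod i (seats.length : Int)) "") ∘
        fun k : Nat => (0 : Int) + (k : Int))
        = fun k : Nat => seats.getD (k % seats.length) "" := by
      funext k
      simp only [Function.comp_apply, zero_add, PySem.Int.mod_natCast, PySem.List.pyGetD_natCast]
    rw [hmapeq]
    apply List.ext_getElem?
    intro i
    rw [List.getElem?_map, List.getElem?_take]
    by_cases hi : i < m
    · have hi' : i < (m / seats.length + 1) * seats.length := by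
        have h1 := Nat.div_add_mod m seats.length
        have h2 := Nat.mod_lt m hL0
        have h3 : (m / seats.length + 1) * seats.length
            = seats.length * (m / seats.length) + seats.length := by ring
        omega
      have hiL : i % seats.length < seats.length := Nat.mod_lt _ hL0
      rw [if_pos hi, getElem?_flatten_replicate seats _ i hi', List.getElem?_range hi,
        Option.map_some, List.getElem?_eq_getElem hiL, List.getD_eq_getElem _ _ hiL]
    · rw [if_neg hi, List.getElem?_eq_none (by simpa using hi), Option.map_none]

-- ===== VERDICT (by name: the statement is the Claim_ definition above) =====
theorem generate_seat_numbers_spec : Claim_equal_generate_seat_numbers := by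
  intro n ct _ hpre
  unfold Spec_generate_seat_numbers generate_seat_numbers generate_seat_numbers_alt
  rcases hpre with h | h | h | h <;> subst h <;>
    exact key _ (by decide) n
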